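-- pv_equiv track=rewrite | github.com/minnj00/algorithm | 프로그래머스/unrated/181890. 왼쪽 오른쪽/왼쪽 오른쪽.py | solution
-- ===== SOURCE A (Python) =====
-- def solution(str_list):
--     if 'l' not in str_list and 'r' not in str_list:
--         return []
--     else:
--         for i in range(len(str_list)):
--             if str_list[i] == "l":
--                 return str_list[:i]
--             elif str_list[i] == "r":
--                 return str_list[i+1:]
-- ===== SOURCE B (Python) =====
-- def solution(str_list):
--     prefix = []
--     it = iter(str_list)
--     for s in it:
--         if s == 'l':
--             return prefix
--         if s == 'r':
--             return list(it)
--         prefix.append(s)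
--     return []
-- ===== Notes on version B (the rewrite author's own statement) =====
-- stated objective: alternative
-- what changed: Replaces A's membership pre-check plus index loop with slicing of the original list by one accumulator pass that builds the prefix element by element and materialises the rest of the iterator, never computing indices, membership or slices.
import Mathlib
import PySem

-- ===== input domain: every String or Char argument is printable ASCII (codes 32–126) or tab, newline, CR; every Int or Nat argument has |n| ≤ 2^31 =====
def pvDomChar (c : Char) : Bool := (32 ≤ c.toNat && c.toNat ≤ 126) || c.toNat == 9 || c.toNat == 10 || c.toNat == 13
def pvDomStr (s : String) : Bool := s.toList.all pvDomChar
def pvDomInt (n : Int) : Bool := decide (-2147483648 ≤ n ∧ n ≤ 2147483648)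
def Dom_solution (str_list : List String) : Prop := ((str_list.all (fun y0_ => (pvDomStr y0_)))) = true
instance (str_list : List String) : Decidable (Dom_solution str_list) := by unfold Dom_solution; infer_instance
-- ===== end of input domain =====

-- B replaces A's membership pre-check + index loop + slicing by one accumulator pass
-- that builds the prefix directly and returns the remaining tail (objective: alternative).

-- ===== PORT A =====
-- A's for-loop over range(len(str_list)) with early returns, as structural recursion
-- carrying the current index i and the remaining suffix of the list.
def solLoopA (str_list : List String) : Nat → List String → Option (List String)
  | _, [] => none
  | i, s :: rest =>
    if s = "l" then some (PySem.List.slice str_list none (some (i : Int)))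
    else if s = "r" then some (PySem.List.slice str_list (some ((i : Int) + 1)) none)
    else solLoopA str_list (i + 1) rest

def solution (str_list : List String) : List String :=
  if ¬ ("l" ∈ str_list) ∧ ¬ ("r" ∈ str_list) then []
  else (solLoopA str_list 0 str_list).getD []   -- falling off the loop is unreachable here (never hit on admitted inputs)

-- ===== PORT B =====
-- Source B's single pass: 'prefix' is the accumulator, the recursion argument is the
-- not-yet-consumed part of the iterator; 'list(it)' is the rest of that argument.
def solGoB (pre : List String) : List String → List String
  | [] => []
  | s :: rest =>
    if s = "l" then pre
    else if s = "r" then rest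
    else solGoB (pre ++ [s]) rest

def solution_alt (str_list : List String) : List String :=
  solGoB [] str_list

-- ===== PRECONDITION & SPEC =====
def Spec_solution (str_list : List String) (out : List String) : Prop := out = solution_alt str_list
instance (str_list : List String) (out : List String) : Decidable (Spec_solution str_list out) := by unfold Spec_solution; infer_instance

-- ===== CLAIM =====
def Claim_equal_solution : Prop := ∀ (str_list : List String), Dom_solution str_list → Spec_solution str_list (solution str_list)

-- ===== LEMMAS AND PROOFS =====

-- A's loop, characterised by the first indices of "l" and "r" in the remaining suffix.
theorem solLoopA_eq (full : List String) : ∀ (xs : List String) (i : Nat),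
    solLoopA full i xs =
      match PySem.List.index? xs "l", PySem.List.index? xs "r" with
      | none, none => none
      | some l, none => some (PySem.List.slice full none (some ((i + l : Nat) : Int)))
      | none, some r => some (PySem.List.slice full (some (((i + r : Nat) : Int) + 1)) none)
      | some l, some r =>
          if l < r then some (PySem.List.slice full none (some ((i + l : Nat) : Int)))
          else some (PySem.List.slice full (some (((i + r : Nat) : Int) + 1)) none)
  | [], _ => by simp [solLoopA, PySem.List.index?]
  | s :: rest, i => by
    by_cases hl : s = "l"
    · subst hl
      rw [solLoopA, PySem.List.index?_cons_self "l" rest,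
          PySem.List.index?_cons_of_ne rest (show ("l" : String) ≠ "r" by decide)]
      cases hr : PySem.List.index? rest "r" with
      | none => simp
      | some r => simp
    · by_cases hr : s = "r"
      · subst hr
        rw [solLoopA, PySem.List.index?_cons_self "r" rest,
            PySem.List.index?_cons_of_ne rest (show ("r" : String) ≠ "l" by decide)]
        cases hl' : PySem.List.index? rest "l" with
        | none => simp
        | some l => simp
      · rw [solLoopA]
        simp only [hl, hr, if_false]
        rw [solLoopA_eq full rest (i + 1),
            PySem.List.index?_cons_of_ne rest (fun h => hl h),
            PySem.List.index?_cons_of_ne rest (fun h => hr h)]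
        cases hl' : PySem.List.index? rest "l" with
        | none =>
          cases hr' : PySem.List.index? rest "r" with
          | none => simp
          | some r =>
            simp only [Option.map_some]
            congr 3
            push_cast
            ring
        | some l =>
          cases hr' : PySem.List.index? rest "r" with
          | none =>
            simp only [Option.map_some]
            congr 3
            push_cast
            ring
          | some r =>
            simp only [Option.map_some]
            by_cases h : l < r
            · rw [if_pos h, if_pos (by omega : l + 1 < r + 1)]
              congr 3
              push_cast
              ring
            · rw [if_neg h, if_neg (by omega : ¬ l + 1 < r + 1)]
              congr 3
              push_cast
              ring

-- B's pass, characterised the same way: prefix-so-far ++ take, or drop past the first "r".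
theorem solGoB_eq : ∀ (xs pre : List String),
    solGoB pre xs =
      match PySem.List.index? xs "l", PySem.List.index? xs "r" with
      | none, none => []
      | some l, none => pre ++ xs.take l
      | none, some r => xs.drop (r + 1)
      | some l, some r =>
          if l < r then pre ++ xs.take l else xs.drop (r + 1)
  | [], pre => by simp [solGoB, PySem.List.index?]
  | s :: rest, pre => by
    by_cases hl : s = "l"
    · subst hl
      rw [solGoB, PySem.List.index?_cons_self "l" rest,
          PySem.List.index?_cons_of_ne rest (show ("l" : String) ≠ "r" by decide)]
      cases hr : PySem.List.index? rest "r" with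
      | none => simp
      | some r => simp
    · by_cases hr : s = "r"
      · subst hr
        rw [solGoB, PySem.List.index?_cons_self "r" rest,
            PySem.List.index?_cons_of_ne rest (show ("r" : String) ≠ "l" by decide)]
        cases hl' : PySem.List.index? rest "l" with
        | none => simp
        | some l => simp
      · rw [solGoB]
        simp only [hl, hr, if_false]
        rw [solGoB_eq rest (pre ++ [s]),
            PySem.List.index?_cons_of_ne rest (fun h => hl h),
            PySem.List.index?_cons_of_ne rest (fun h => hr h)]
        cases hl' : PySem.List.index? rest "l" with
        | none =>
          cases hr' : PySem.List.index? rest "r" with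
          | none => simp
          | some r => simp
        | some l =>
          cases hr' : PySem.List.index? rest "r" with
          | none => simp
          | some r =>
            simp only [Option.map_some]
            by_cases h : l < r
            · rw [if_pos h, if_pos (by omega : l + 1 < r + 1)]
              simp
            · rw [if_neg h, if_neg (by omega : ¬ l + 1 < r + 1)]
              simp

-- ===== VERDICT =====
theorem solution_spec : Claim_equal_solution := by
  intro xs _
  unfold Spec_solution solution solution_alt
  rw [solGoB_eq]
  have hslL : ∀ l : Nat, PySem.List.slice xs none (some ((0 + l : Nat) : Int)) = xs.take l := by
    intro l; rw [Nat.zero_add]; exact PySem.List.slice_to_natCast xs l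
  have hslR : ∀ r : Nat, PySem.List.slice xs (some (((0 + r : Nat) : Int) + 1)) none = xs.drop (r + 1) := by
    intro r
    rw [Nat.zero_add, (by push_cast; ring : ((r : Nat) : Int) + 1 = ((r + 1 : Nat) : Int))]
    exact PySem.List.slice_from_natCast xs (r + 1)
  by_cases hl : "l" ∈ xs
  · obtain ⟨l, hlidx⟩ := Option.isSome_iff_exists.mp ((PySem.List.index?_isSome_iff xs "l").mpr hl)
    by_cases hr : "r" ∈ xs
    · obtain ⟨r, hridx⟩ := Option.isSome_iff_exists.mp ((PySem.List.index?_isSome_iff xs "r").mpr hr)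
      rw [if_neg (by simp [hl]), solLoopA_eq xs xs 0, hlidx, hridx]
      by_cases hlr : l < r
      · simp only [if_pos hlr, Option.getD_some, List.nil_append, hslL]
      · simp only [if_neg hlr, Option.getD_some, hslR]
    · rw [if_neg (by simp [hl]), solLoopA_eq xs xs 0, hlidx,
          (PySem.List.index?_eq_none_iff xs "r").mpr hr]
      simp only [Option.getD_some, List.nil_append, hslL]
  · by_cases hr : "r" ∈ xs
    · obtain ⟨r, hridx⟩ := Option.isSome_iff_exists.mp ((PySem.List.index?_isSome_iff xs "r").mpr hr)
      rw [if_neg (by simp [hr]), solLoopA_eq xs xs 0, hridx,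
          (PySem.List.index?_eq_none_iff xs "l").mpr hl]
      simp only [Option.getD_some, hslR]
    · rw [if_pos ⟨hl, hr⟩, (PySem.List.index?_eq_none_iff xs "l").mpr hl,
          (PySem.List.index?_eq_none_iff xs "r").mpr hr]
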